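-- pv_equiv track=rewrite | github.com/jdaniel166/algorithms | algorithms/astonstring.py | ashtonString
-- ===== SOURCE A (Python) =====
-- def ashtonString(text, k):
--     # Write your code here
--     stackp = [("", [i for i in range(len(text))])]
--     while stackp != []:
--         prefixstr, startindexes = stackp.pop()
--         if k <= len(prefixstr):
--             return prefixstr[k-1]
--         k -= len(prefixstr)
--         sortedstr = sorted([(text[i], i+1) for i in startindexes if i < len(text)], reverse=True)
--         i = 0
--         while (i < len(sortedstr)):
--             j = i +1
--             pre = sortedstr[i][0]
--             indexval = [sortedstr[i][1]]
--             while j < len(sortedstr) and pre == sortedstr[j][0]: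
--                 indexval.append(sortedstr[j][1])
--                 j += 1
--             stackp.append((prefixstr+pre, indexval))
--             i = j
--     return None
-- ===== SOURCE B (Python) =====
-- def ashtonString(text, k):
--     n = len(text)
--     subs = {text[i:j] for i in range(n) for j in range(i + 1, n + 1)}
--     whole = "".join(sorted(subs))
--     return whole[k - 1] if k <= len(whole) else None
-- ===== Notes on version B (the rewrite author's own statement) =====
-- stated objective: simpler
-- what changed: B materializes the set of all distinct substrings with one set comprehension, sorts it once and indexes directly into the joined string, instead of A's lazy DFS over the implicit suffix trie with a per-node reverse-sort, run-scan and k-subtraction.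
import Mathlib
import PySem

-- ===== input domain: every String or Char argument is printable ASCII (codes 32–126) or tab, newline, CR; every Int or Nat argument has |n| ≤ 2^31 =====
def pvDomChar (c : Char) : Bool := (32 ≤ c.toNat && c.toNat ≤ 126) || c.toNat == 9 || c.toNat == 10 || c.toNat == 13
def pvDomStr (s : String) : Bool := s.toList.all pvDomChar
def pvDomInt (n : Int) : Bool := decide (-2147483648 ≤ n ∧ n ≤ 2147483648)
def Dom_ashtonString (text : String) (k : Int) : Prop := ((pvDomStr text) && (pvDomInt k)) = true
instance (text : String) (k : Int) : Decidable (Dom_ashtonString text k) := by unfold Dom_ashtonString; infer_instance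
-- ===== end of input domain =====

-- B replaces A's lazy DFS over the implicit suffix trie (a stack of nodes, each reverse-sorted
-- and scanned for runs, subtracting prefix lengths from k) by materialising the set of ALL
-- distinct substrings, sorting it once and indexing directly into the joined string (simpler,
-- not faster). Both ports work on text.toList; a Python 1-character string is ported as Char.

-- ===== PORT A =====
-- inner `while j < len(sortedstr) and pre == sortedstr[j][0]` loop: collects the run of
-- pairs whose character equals `pre`, returns (their indexes, the remaining pairs)
def pvTakeRun (c : Char) : List (Char × Int) → List Int × List (Char × Int)
  | [] => ([], [])
  | (c', i) :: tl =>
    if c = c' then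
      ((i :: (pvTakeRun c tl).1), (pvTakeRun c tl).2)
    else ([], (c', i) :: tl)

-- cited by pvScanPush's decreasing_by
theorem pvTakeRun_snd_length (c : Char) (l : List (Char × Int)) :
    (pvTakeRun c l).2.length ≤ l.length := by
  induction l with
  | nil => simp [pvTakeRun]
  | cons p tl ih =>
    obtain ⟨c', i⟩ := p
    simp only [pvTakeRun]
    split
    · simpa using Nat.le_succ_of_le ih
    · simp

-- outer `while i < len(sortedstr)` loop: forms each run and appends the new node to the
-- stack (Python appends at the right end / pops from the right end; the port holds the
-- stack top-first, so an append is a cons)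
def pvScanPush (pfx : List Char) : List (Char × Int) → List (List Char × List Int) → List (List Char × List Int)
  | [], st => st
  | (c, i) :: tl, st =>
    pvScanPush pfx (pvTakeRun c tl).2 ((pfx ++ [c], i :: (pvTakeRun c tl).1) :: st)
  termination_by l _ => l.length
  decreasing_by simpa using Nat.lt_succ_of_le (pvTakeRun_snd_length c tl)

-- `[(text[i], i+1) for i in startindexes if i < len(text)]` (the indexes A builds are
-- always in range, so the pyGet? lookup is a `some`)
def pvPairsA (cs : List Char) (starts : List Int) : List (Char × Int) :=
  starts.filterMap (fun i =>
    if i < (cs.length : Int) then (PySem.List.pyGet? cs i).map (fun c => (c, i + 1)) else none)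

-- the `while stackp != []` loop; the fuel only makes the recursion total and is proved
-- sufficient below (the loop pops at most 1 + n(n+1)/2 nodes)
def pvLoopA (cs : List Char) : Nat → List (List Char × List Int) → Int → Option String
  | 0, _, _ => none
  | _ + 1, [], _ => none
  | fuel + 1, (pfx, starts) :: rest, k =>
    if k ≤ (pfx.length : Int) then
      (PySem.List.pyGet? pfx (k - 1)).map (fun c => String.ofList [c])
    else
      pvLoopA cs fuel
        (pvScanPush pfx (PySem.List.sorted2 (pvPairsA cs starts) Prod.fst Prod.snd true) rest)
        (k - pfx.length)

def ashtonString (text : String) (k : Int) : Option String :=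
  let cs := text.toList
  pvLoopA cs (cs.length * cs.length + cs.length + 2) [([], PySem.List.pyRange 0 cs.length 1)] k

-- ===== PORT B =====
-- `{text[i:j] for i in range(n) for j in range(i + 1, n + 1)}`: the generated slices, in
-- comprehension order (Set.ofList below keeps the distinct ones)
def pvGen (cs : List Char) : List (List Char) :=
  (PySem.List.pyRange 0 cs.length 1).flatMap (fun i =>
    (PySem.List.pyRange (i + 1) ((cs.length : Int) + 1) 1).map (fun j =>
      PySem.List.slice cs (some i) (some j)))

def ashtonString_alt (text : String) (k : Int) : Option String :=
  let cs := text.toList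
  let subs := PySem.Set.ofList (pvGen cs)
  let whole := (PySem.List.sorted subs (fun x => x) false).flatten
  if k ≤ (whole.length : Int) then
    (PySem.List.pyGet? whole (k - 1)).map (fun c => String.ofList [c])
  else none

-- ===== PRECONDITION & SPEC =====
-- Pre_ excludes exactly k ≤ 0, where A raises IndexError (`""[k-1]` on its root node).
def Pre_ashtonString (text : String) (k : Int) : Prop := 1 ≤ k
instance (text : String) (k : Int) : Decidable (Pre_ashtonString text k) := by
  unfold Pre_ashtonString; infer_instance

def pvWitness_ashtonString : String × Int := ("ab", 2)

def Spec_ashtonString (text : String) (k : Int) (out : Option String) : Prop := out = ashtonString_alt text k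
instance (text : String) (k : Int) (out : Option String) : Decidable (Spec_ashtonString text k out) := by unfold Spec_ashtonString; infer_instance

-- ===== CLAIM (what is proved, stated in full; the proofs are below) =====
def Claim_equal_ashtonString : Prop := ∀ (text : String) (k : Int), Dom_ashtonString text k → Pre_ashtonString text k → Spec_ashtonString text k (ashtonString text k)

-- ===== LEMMAS AND PROOFS =====

-- weight of one occurrence end, and the measure of a node's occurrence list
def pvW (cs : List Char) (j : Int) : Nat := ((cs.length : Int) - j).toNat
def pvMu (cs : List Char) (S : List Int) : Nat := (S.map (pvW cs)).sum
def pvInv (cs : List Char) (S : List Int) : Prop := ∀ j ∈ S, 0 ≤ j ∧ j ≤ (cs.length : Int)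

-- the `groups` dict A's run-grouping is compared against: occurrence ends keyed by next char
def pvGroupsB (cs : List Char) (starts : List Int) : PySem.Dict Char (List Int) :=
  starts.foldl (fun d j =>
    if j < (cs.length : Int) then
      match PySem.List.pyGet? cs j with
      | some c => d.modify c [] (fun g => g ++ [j + 1])
      | none => d
    else d) PySem.Dict.empty

def pvChildrenB (cs : List Char) (pfx : List Char) (starts : List Int) : List (List Char × List Int) :=
  (PySem.List.sorted (PySem.Dict.keys (pvGroupsB cs starts)) (fun x => x) false).map
    (fun c => (pfx ++ [c], (pvGroupsB cs starts).getD c []))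

-- A's recursion written as a spec function: process one node completely
def pvGoB (cs : List Char) : Nat → List Char → List Int → Int → Option String × Int
  | 0, _, _, k => (none, k)
  | fuel + 1, pfx, starts, k =>
    if k ≤ (pfx.length : Int) then
      ((PySem.List.pyGet? pfx (k - 1)).map (fun c => String.ofList [c]), k)
    else
      (PySem.List.sorted (PySem.Dict.keys (pvGroupsB cs starts)) (fun x => x) false).foldl
        (fun st c => match st with
          | (some a, kk) => (some a, kk)
          | (none, kk) => pvGoB cs fuel (pfx ++ [c]) ((pvGroupsB cs starts).getD c []) kk)
        (none, k - pfx.length)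

-- process a list of nodes in order, threading k
def pvChain (cs : List Char) : List (List Char × List Int) → Int → Option String × Int
  | [], k => (none, k)
  | (pfx, S) :: rest, k =>
    match pvGoB cs (pvMu cs S + 1) pfx S k with
    | (some a, k') => (some a, k')
    | (none, k') => pvChain cs rest k'

-- proof-side form of A's run grouping
def pvRuns : List (Char × Int) → List (Char × List Int)
  | [] => []
  | (c, i) :: tl => (c, i :: (pvTakeRun c tl).1) :: pvRuns (pvTakeRun c tl).2
  termination_by l => l.length
  decreasing_by simpa using Nat.lt_succ_of_le (pvTakeRun_snd_length c tl)

def pvL (cs : List Char) (S : List Int) : List (Char × Int) :=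
  PySem.List.sorted2 (pvPairsA cs S) Prod.fst Prod.snd true


theorem pvTakeRun_decomp (c : Char) (l : List (Char × Int)) :
    ((pvTakeRun c l).1.map (fun i => (c, i))) ++ (pvTakeRun c l).2 = l := by
  induction l with
  | nil => simp [pvTakeRun]
  | cons p tl ih =>
    obtain ⟨c', i⟩ := p
    by_cases h : c = c'
    · subst h; simpa [pvTakeRun] using ih
    · simp [pvTakeRun, h]

theorem pvTakeRun_snd_suffix (c : Char) (l : List (Char × Int)) :
    (pvTakeRun c l).2 <:+ l := by
  induction l with
  | nil => simp [pvTakeRun]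
  | cons p tl ih =>
    obtain ⟨c', i⟩ := p
    by_cases h : c = c'
    · subst h
      simp only [pvTakeRun]
      exact ih.trans (List.suffix_cons _ _)
    · simp [pvTakeRun, h]

theorem pvTakeRun_snd_lt (c : Char) (tl : List (Char × Int))
    (h1 : (tl.map Prod.fst).Pairwise (fun a b => b ≤ a))
    (h2 : ∀ p ∈ tl, p.1 ≤ c) :
    ∀ p ∈ (pvTakeRun c tl).2, p.1 < c := by
  induction tl with
  | nil => simp [pvTakeRun]
  | cons q tl' ih =>
    obtain ⟨c', i⟩ := q
    simp only [List.map_cons, List.pairwise_cons] at h1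
    by_cases h : c = c'
    · subst h
      simp only [pvTakeRun]
      exact ih h1.2 (fun p hp => h2 p (List.mem_cons_of_mem _ hp))
    · simp only [pvTakeRun, if_neg h]
      intro p hp
      have hc' : c' < c :=
        lt_of_le_of_ne (h2 (c', i) (List.mem_cons_self)) (fun hh => h (hh.symm))
      rcases List.mem_cons.mp hp with rfl | hp'
      · exact hc'
      · exact lt_of_le_of_lt (h1.1 p.1 (List.mem_map_of_mem hp')) hc'

theorem pvRuns_flat (l : List (Char × Int)) :
    (pvRuns l).flatMap (fun g => g.2.map (fun i => (g.1, i))) = l := by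
  induction l using pvRuns.induct with
  | case1 => simp [pvRuns]
  | case2 c i tl ih =>
    simp only [pvRuns, List.flatMap_cons, ih, List.map_cons]
    rw [List.cons_append]
    rw [pvTakeRun_decomp]

theorem pvRuns_ne (l : List (Char × Int)) : ∀ g ∈ pvRuns l, g.2 ≠ [] := by
  induction l using pvRuns.induct with
  | case1 => simp [pvRuns]
  | case2 c i tl ih =>
    intro g hg
    simp only [pvRuns] at hg
    rcases List.mem_cons.mp hg with rfl | hg'
    · simp
    · exact ih g hg'

theorem pvRuns_chars_sub (l : List (Char × Int)) :
    ∀ a ∈ (pvRuns l).map Prod.fst, a ∈ l.map Prod.fst := by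
  intro a ha
  have := pvRuns_flat l
  rcases List.mem_map.mp ha with ⟨g, hg, rfl⟩
  have hne := pvRuns_ne l g hg
  obtain ⟨j, hj⟩ := List.exists_mem_of_ne_nil _ hne
  have hmem : (g.1, j) ∈ (pvRuns l).flatMap (fun g => g.2.map (fun i => (g.1, i))) := by
    apply List.mem_flatMap.mpr
    exact ⟨g, hg, List.mem_map.mpr ⟨j, hj, rfl⟩⟩
  rw [this] at hmem
  exact List.mem_map.mpr ⟨(g.1, j), hmem, rfl⟩

theorem pvRuns_chars_sup (l : List (Char × Int)) :
    ∀ a ∈ l.map Prod.fst, a ∈ (pvRuns l).map Prod.fst := by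
  intro a ha
  rcases List.mem_map.mp ha with ⟨p, hp, rfl⟩
  rw [← pvRuns_flat l] at hp
  rcases List.mem_flatMap.mp hp with ⟨g, hg, hpg⟩
  rcases List.mem_map.mp hpg with ⟨j, _, hj⟩
  have : p.1 = g.1 := by rw [← hj]
  rw [this]
  exact List.mem_map_of_mem hg

theorem pvRuns_chars_lt (l : List (Char × Int))
    (h : (l.map Prod.fst).Pairwise (fun a b => b ≤ a)) :
    ((pvRuns l).map Prod.fst).Pairwise (fun a b => b < a) := by
  induction l using pvRuns.induct with
  | case1 => simp [pvRuns]
  | case2 c i tl ih =>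
    simp only [List.map_cons, List.pairwise_cons] at h
    simp only [pvRuns, List.map_cons, List.pairwise_cons]
    have hsub : ((pvTakeRun c tl).2.map Prod.fst).Pairwise (fun a b => b ≤ a) :=
      List.Pairwise.sublist ((pvTakeRun_snd_suffix c tl).sublist.map Prod.fst) h.2
    have h2 : ∀ p ∈ tl, p.1 ≤ c := fun p hp => h.1 p.1 (List.mem_map_of_mem hp)
    refine ⟨?_, ih hsub⟩
    intro b hb
    rcases List.mem_map.mp (pvRuns_chars_sub _ b hb) with ⟨p, hp, rfl⟩
    exact pvTakeRun_snd_lt c tl h.2 h2 p hp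

theorem pvRuns_groups (l : List (Char × Int))
    (h : (l.map Prod.fst).Pairwise (fun a b => b ≤ a)) :
    ∀ g ∈ pvRuns l, g.2 = (l.filter (fun p => p.1 == g.1)).map Prod.snd := by
  induction l using pvRuns.induct with
  | case1 => simp [pvRuns]
  | case2 c i tl ih =>
    simp only [List.map_cons, List.pairwise_cons] at h
    have h2 : ∀ p ∈ tl, p.1 ≤ c := fun p hp => h.1 p.1 (List.mem_map_of_mem hp)
    have hrest : ∀ p ∈ (pvTakeRun c tl).2, p.1 < c := pvTakeRun_snd_lt c tl h.2 h2
    have hsub : ((pvTakeRun c tl).2.map Prod.fst).Pairwise (fun a b => b ≤ a) :=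
      List.Pairwise.sublist ((pvTakeRun_snd_suffix c tl).sublist.map Prod.fst) h.2
    have htl : tl = ((pvTakeRun c tl).1.map (fun i => (c, i))) ++ (pvTakeRun c tl).2 :=
      (pvTakeRun_decomp c tl).symm
    intro g hg
    simp only [pvRuns] at hg
    rcases List.mem_cons.mp hg with rfl | hg'
    · have hrun : tl.filter (fun p => p.1 == c) = (pvTakeRun c tl).1.map (fun i => (c, i)) := by
        conv_lhs => rw [htl]
        rw [List.filter_append]
        have ha : ((pvTakeRun c tl).1.map (fun i => (c, i))).filter (fun p => p.1 == c)
            = (pvTakeRun c tl).1.map (fun i => (c, i)) := by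
          apply List.filter_eq_self.mpr
          intro p hp
          rcases List.mem_map.mp hp with ⟨j, _, rfl⟩
          simp
        have hb : ((pvTakeRun c tl).2).filter (fun p => p.1 == c) = [] := by
          apply List.filter_eq_nil_iff.mpr
          intro p hp
          simpa using ne_of_lt (hrest p hp)
        rw [ha, hb, List.append_nil]
      simp only [List.filter_cons, BEq.rfl, if_pos, List.map_cons, hrun]
      simp
    · have ihg := ih hsub g hg'
      have hgc : g.1 < c := by
        rcases List.mem_map.mp (pvRuns_chars_sub _ g.1 (List.mem_map_of_mem hg')) with ⟨p, hp, he⟩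
        rw [← he]; exact hrest p hp
      rw [ihg]
      have hstep : ((c, i) :: tl).filter (fun p => p.1 == g.1)
          = (pvTakeRun c tl).2.filter (fun p => p.1 == g.1) := by
        rw [List.filter_cons]
        have hcg : ((c, i).1 == g.1) = false := by
          simpa using ne_of_gt hgc
        rw [hcg]
        simp only [Bool.false_eq_true, if_false]
        conv_lhs => rw [htl]
        rw [List.filter_append]
        have ha : ((pvTakeRun c tl).1.map (fun i => (c, i))).filter (fun p => p.1 == g.1) = [] := by
          apply List.filter_eq_nil_iff.mpr
          intro p hp
          rcases List.mem_map.mp hp with ⟨j, _, rfl⟩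
          simpa using ne_of_gt hgc
        rw [ha, List.nil_append]
      rw [hstep]

theorem pvScanPush_eq (pfx : List Char) (l : List (Char × Int)) (st : List (List Char × List Int)) :
    pvScanPush pfx l st = ((pvRuns l).map (fun g => (pfx ++ [g.1], g.2))).reverse ++ st := by
  induction l using pvRuns.induct generalizing st with
  | case1 => simp [pvScanPush, pvRuns]
  | case2 c i tl ih =>
    simp only [pvScanPush, pvRuns, List.map_cons, List.reverse_cons, ih]
    simp [List.append_assoc]


theorem pvL_eq_sorted (cs : List Char) (S : List Int) :
    pvL cs S = PySem.List.sorted (pvPairsA cs S) (fun p => (toLex p : Lex (Char × Int))) true := by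
  show List.foldl _ [] _ = List.foldl _ [] _
  congr 1
  funext acc x
  congr 1
  funext a b
  show (decide (b.1 < a.1) || (!decide (a.1 < b.1) && decide (b.2 < a.2)))
      = decide ((toLex b : Lex (Char × Int)) < toLex a)
  have : ((toLex b : Lex (Char × Int)) < toLex a) ↔ (b.1 < a.1 ∨ (b.1 = a.1 ∧ b.2 < a.2)) :=
    Prod.Lex.lt_iff
  rcases lt_trichotomy a.1 b.1 with hlt | heq | hgt
  · simp [this, hlt, not_lt_of_gt hlt, ne_of_gt hlt]
  · simp [this, heq]
  · simp [this, hgt, not_lt_of_gt hgt]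

theorem pvL_fst_pairwise (cs : List Char) (S : List Int) :
    ((pvL cs S).map Prod.fst).Pairwise (fun a b => b ≤ a) := by
  rw [pvL_eq_sorted, List.pairwise_map]
  have h := PySem.List.sorted_pairwise_rev (pvPairsA cs S) (fun p => (toLex p : Lex (Char × Int)))
  refine h.imp ?_
  intro a b hab
  rcases Prod.Lex.le_iff.mp hab with hlt | ⟨heq, _⟩
  · exact le_of_lt hlt
  · exact le_of_eq heq

theorem pvL_perm (cs : List Char) (S : List Int) : (pvL cs S).Perm (pvPairsA cs S) :=
  PySem.List.sorted2_perm _ _ _ _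

theorem pvPairsA_mem (cs : List Char) (S : List Int) (p : Char × Int) (hp : p ∈ pvPairsA cs S) :
    ∃ j ∈ S, j < (cs.length : Int) ∧ p.2 = j + 1 := by
  rcases List.mem_filterMap.mp hp with ⟨j, hjS, hf⟩
  by_cases hj : j < (cs.length : Int)
  · refine ⟨j, hjS, hj, ?_⟩
    rw [if_pos hj] at hf
    rcases Option.map_eq_some_iff.mp hf with ⟨c, _, rfl⟩
    rfl
  · rw [if_neg hj] at hf; cases hf

theorem pvPairsA_perm (cs : List Char) {S S' : List Int} (h : S.Perm S') :
    (pvPairsA cs S).Perm (pvPairsA cs S') := h.filterMap _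

theorem pvMu_perm (cs : List Char) {S S' : List Int} (h : S.Perm S') :
    pvMu cs S = pvMu cs S' := (h.map (pvW cs)).sum_eq

theorem pvInv_perm (cs : List Char) {S S' : List Int} (hp : S.Perm S') (h : pvInv cs S) :
    pvInv cs S' := fun j hj => h j (hp.mem_iff.mpr hj)

theorem pvMu_pairs (cs : List Char) (S : List Int) (h : pvInv cs S) :
    pvMu cs ((pvPairsA cs S).map Prod.snd) + (pvPairsA cs S).length ≤ pvMu cs S := by
  induction S with
  | nil => simp [pvPairsA, pvMu]
  | cons j S' ih =>
    have hj := h j List.mem_cons_self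
    have hrest : pvInv cs S' := fun x hx => h x (List.mem_cons_of_mem _ hx)
    have ih' := ih hrest
    by_cases hlt : j < (cs.length : Int)
    · have hget : PySem.List.pyGet? cs j = some (cs[j.toNat]) :=
        PySem.List.pyGet?_eq_some_getElem cs hj.1 (by simpa using hlt)
      have hcons : pvPairsA cs (j :: S') = (cs[j.toNat], j + 1) :: pvPairsA cs S' := by
        unfold pvPairsA
        rw [List.filterMap_cons]
        simp [if_pos hlt, hget]
      rw [hcons]
      simp only [pvMu, List.map_cons, List.sum_cons, List.length_cons]
      have hw : pvW cs (j + 1) + 1 = pvW cs j := by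
        unfold pvW; omega
      simp only [pvMu] at ih'
      omega
    · have hcons : pvPairsA cs (j :: S') = pvPairsA cs S' := by
        unfold pvPairsA
        rw [List.filterMap_cons]
        simp [if_neg hlt]
      rw [hcons]
      simp only [pvMu, List.map_cons, List.sum_cons]
      simp only [pvMu] at ih'
      omega

theorem pvGroupsB_eq (cs : List Char) (S : List Int) :
    pvGroupsB cs S = (pvPairsA cs S).foldl
      (fun d p => d.modify p.1 [] (fun g => g ++ [p.2])) PySem.Dict.empty := by
  unfold pvGroupsB pvPairsA
  rw [List.foldl_filterMap]
  apply PySem.List.foldl_congr_mem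
  intro acc x _
  by_cases hx : x < (cs.length : Int)
  · simp only [if_pos hx]
    cases PySem.List.pyGet? cs x <;> simp
  · simp [hx]

theorem pvGroupsB_getD (cs : List Char) (S : List Int) (c : Char) :
    (pvGroupsB cs S).getD c [] = ((pvPairsA cs S).filter (fun p => p.1 == c)).map Prod.snd := by
  rw [pvGroupsB_eq, PySem.Dict.getD_foldl_modify_append]
  simp [PySem.Dict.getD_empty]

theorem pvGroupsB_keys (cs : List Char) (S : List Int) :
    (pvGroupsB cs S).keys = PySem.Set.ofList ((pvPairsA cs S).map Prod.fst) := by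
  rw [pvGroupsB_eq]
  rw [PySem.Dict.keys_foldl_modify_key (pvPairsA cs S) Prod.fst [] (fun d p => fun g => g ++ [p.2]) PySem.Dict.empty]
  rfl

theorem pvGroupsB_keys_nodup (cs : List Char) (S : List Int) : (pvGroupsB cs S).keys.Nodup := by
  rw [pvGroupsB_keys]; exact PySem.Set.nodup_ofList _

theorem pvGroup_ne (cs : List Char) (S : List Int) (c : Char)
    (hc : c ∈ (pvGroupsB cs S).keys) : (pvGroupsB cs S).getD c [] ≠ [] := by
  rw [pvGroupsB_keys] at hc
  rw [pvGroupsB_getD]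
  rcases List.mem_map.mp ((PySem.Set.mem_ofList _ _).mp hc) with ⟨p, hp, rfl⟩
  intro hcontra
  have := List.filter_eq_nil_iff.mp (List.map_eq_nil_iff.mp hcontra) p hp
  simp at this

theorem pvGroup_inv (cs : List Char) (S : List Int) (c : Char) (h : pvInv cs S) :
    pvInv cs ((pvGroupsB cs S).getD c []) := by
  rw [pvGroupsB_getD]
  intro j hj
  rcases List.mem_map.mp hj with ⟨p, hp, rfl⟩
  rcases pvPairsA_mem cs S p (List.mem_of_mem_filter hp) with ⟨j0, hj0S, hj0n, he⟩
  have := h j0 hj0S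
  omega

theorem pvGroup_mu_lt (cs : List Char) (S : List Int) (c : Char) (h : pvInv cs S)
    (hne : (pvGroupsB cs S).getD c [] ≠ []) :
    pvMu cs ((pvGroupsB cs S).getD c []) < pvMu cs S := by
  rw [pvGroupsB_getD] at hne ⊢
  have hsub : (((pvPairsA cs S).filter (fun p => p.1 == c)).map Prod.snd).Sublist
      ((pvPairsA cs S).map Prod.snd) := ((pvPairsA cs S).filter_sublist).map _
  have h1 : pvMu cs (((pvPairsA cs S).filter (fun p => p.1 == c)).map Prod.snd)
      ≤ pvMu cs ((pvPairsA cs S).map Prod.snd) :=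
    List.Sublist.sum_le_sum (hsub.map (pvW cs)) (by intro a _; exact Nat.zero_le a)
  have hlen1 : 1 ≤ ((pvPairsA cs S).filter (fun p => p.1 == c)).length := by
    have hf : (pvPairsA cs S).filter (fun p => p.1 == c) ≠ [] := by
      intro hc; exact hne (by rw [hc]; rfl)
    have := List.length_pos_iff.mpr hf
    omega
  have hlen2 : ((pvPairsA cs S).filter (fun p => p.1 == c)).length ≤ (pvPairsA cs S).length :=
    List.length_filter_le _ _
  have h2 := pvMu_pairs cs S h
  have hlm : (((pvPairsA cs S).filter (fun p => p.1 == c)).map Prod.snd).length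
      = ((pvPairsA cs S).filter (fun p => p.1 == c)).length := List.length_map ..
  have hlm2 : ((pvPairsA cs S).map Prod.snd).length = (pvPairsA cs S).length := List.length_map ..
  omega


theorem pvSortedKeys_eq (cs : List Char) (S : List Int) :
    PySem.List.sorted ((pvGroupsB cs S).keys) (fun x => x) false
      = ((pvRuns (pvL cs S)).map Prod.fst).reverse := by
  apply PySem.List.sorted_eq_of_perm_of_pairwise_lt
  · have hlt := pvRuns_chars_lt (pvL cs S) (pvL_fst_pairwise cs S)
    have hnd1 : ((pvRuns (pvL cs S)).map Prod.fst).reverse.Nodup := by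
      rw [List.nodup_reverse]
      exact hlt.imp (fun h => (ne_of_lt h).symm)
    have hnd2 : (pvGroupsB cs S).keys.Nodup := pvGroupsB_keys_nodup cs S
    apply (List.perm_ext_iff_of_nodup hnd1 hnd2).mpr
    intro a
    rw [List.mem_reverse, pvGroupsB_keys, PySem.Set.mem_ofList]
    constructor
    · intro ha
      have := pvRuns_chars_sub (pvL cs S) a ha
      exact ((pvL_perm cs S).map Prod.fst).mem_iff.mp this
    · intro ha
      exact pvRuns_chars_sup (pvL cs S) a (((pvL_perm cs S).map Prod.fst).mem_iff.mpr ha)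
  · rw [List.pairwise_reverse]
    exact pvRuns_chars_lt (pvL cs S) (pvL_fst_pairwise cs S)

theorem pvGroup_perm_run (cs : List Char) (S : List Int) (g : Char × List Int)
    (hg : g ∈ pvRuns (pvL cs S)) :
    ((pvGroupsB cs S).getD g.1 []).Perm g.2 := by
  rw [pvGroupsB_getD, pvRuns_groups (pvL cs S) (pvL_fst_pairwise cs S) g hg]
  exact ((pvL_perm cs S).symm.filter _).map _

-- sum of (1 + f x) over a list
theorem pvSum_one_add {α : Type} (f : α → Nat) (l : List α) :
    (l.map (fun x => 1 + f x)).sum = l.length + (l.map f).sum := by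
  induction l with
  | nil => simp
  | cons x l ih => simp [ih]; omega

theorem pvRuns_cost (cs : List Char) (S : List Int) (h : pvInv cs S) :
    ((pvRuns (pvL cs S)).map (fun g => 1 + pvMu cs g.2)).sum ≤ pvMu cs S := by
  have hflat : (pvRuns (pvL cs S)).flatMap (fun g => g.2) = (pvL cs S).map Prod.snd := by
    have := congrArg (List.map Prod.snd) (pvRuns_flat (pvL cs S))
    simpa [List.map_flatMap, List.map_map, Function.comp_def] using this
  have hsum : ((pvRuns (pvL cs S)).map (fun g => pvMu cs g.2)).sum
      = pvMu cs ((pvL cs S).map Prod.snd) := by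
    unfold pvMu
    rw [← hflat, List.map_flatMap, List.flatMap_def, List.sum_flatten, List.map_map]
    rfl
  have hcount : (pvRuns (pvL cs S)).length ≤ ((pvL cs S).map Prod.snd).length := by
    have h1 : ((pvRuns (pvL cs S)).map (fun _ => 1)).sum
        ≤ ((pvRuns (pvL cs S)).map (fun g => g.2.length)).sum := by
      apply List.sum_le_sum
      intro g hg
      have := pvRuns_ne (pvL cs S) g hg
      have := List.length_pos_iff.mpr this
      omega
    have h2 : ((pvRuns (pvL cs S)).map (fun g => g.2.length)).sum
        = ((pvL cs S).map Prod.snd).length := by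
      rw [← hflat, List.length_flatMap]
    have h3 : ((pvRuns (pvL cs S)).map (fun _ => 1)).sum = (pvRuns (pvL cs S)).length := by
      simp
    omega
  have hperm := (pvL_perm cs S).map Prod.snd
  have hmu : pvMu cs ((pvL cs S).map Prod.snd) = pvMu cs ((pvPairsA cs S).map Prod.snd) :=
    pvMu_perm cs hperm
  have hlen : ((pvL cs S).map Prod.snd).length = ((pvPairsA cs S).map Prod.snd).length :=
    hperm.length_eq
  have hmp := pvMu_pairs cs S h
  rw [pvSum_one_add, hsum]
  have hlen2 : ((pvPairsA cs S).map Prod.snd).length = (pvPairsA cs S).length := List.length_map ..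
  omega

theorem pvGoB_perm (cs : List Char) : ∀ (fuel : Nat) (pfx : List Char) {S S' : List Int},
    S.Perm S' → ∀ k, pvGoB cs fuel pfx S k = pvGoB cs fuel pfx S' k := by
  intro fuel
  induction fuel with
  | zero => intro pfx S S' h k; rfl
  | succ f ih =>
    intro pfx S S' h k
    simp only [pvGoB]
    by_cases hk : k ≤ (pfx.length : Int)
    · rw [if_pos hk, if_pos hk]
    · rw [if_neg hk, if_neg hk]
      have hkeys : PySem.List.sorted (pvGroupsB cs S).keys (fun x => x) false
          = PySem.List.sorted (pvGroupsB cs S').keys (fun x => x) false := by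
        apply PySem.List.sorted_eq_sorted_of_perm _ _ _ (fun a b hab => hab)
        rw [pvGroupsB_keys, pvGroupsB_keys]
        apply (List.perm_ext_iff_of_nodup (PySem.Set.nodup_ofList _) (PySem.Set.nodup_ofList _)).mpr
        intro a
        rw [PySem.Set.mem_ofList, PySem.Set.mem_ofList]
        exact ((pvPairsA_perm cs h).map Prod.fst).mem_iff
      rw [hkeys]
      apply PySem.List.foldl_congr_mem
      intro acc c _
      obtain ⟨o, kk⟩ := acc
      cases o with
      | some a => rfl
      | none =>
        show pvGoB cs f (pfx ++ [c]) ((pvGroupsB cs S).getD c []) kk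
            = pvGoB cs f (pfx ++ [c]) ((pvGroupsB cs S').getD c []) kk
        apply ih
        rw [pvGroupsB_getD, pvGroupsB_getD]
        exact ((pvPairsA_perm cs h).filter _).map _

theorem pvGoB_stab (cs : List Char) : ∀ (m f g : Nat) (pfx : List Char) (S : List Int) (k : Int),
    pvMu cs S ≤ m → pvInv cs S → pvMu cs S < f → pvMu cs S < g →
    pvGoB cs f pfx S k = pvGoB cs g pfx S k := by
  intro m
  induction m using Nat.strong_induction_on with
  | _ m ih =>
    intro f g pfx S k hm hinv hf hg
    obtain ⟨f', rfl⟩ := Nat.exists_eq_succ_of_ne_zero (by omega : f ≠ 0)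
    obtain ⟨g', rfl⟩ := Nat.exists_eq_succ_of_ne_zero (by omega : g ≠ 0)
    simp only [pvGoB]
    by_cases hk : k ≤ (pfx.length : Int)
    · rw [if_pos hk, if_pos hk]
    · rw [if_neg hk, if_neg hk]
      apply PySem.List.foldl_congr_mem
      intro acc c hc
      obtain ⟨o, kk⟩ := acc
      cases o with
      | some a => rfl
      | none =>
        show pvGoB cs f' (pfx ++ [c]) ((pvGroupsB cs S).getD c []) kk
            = pvGoB cs g' (pfx ++ [c]) ((pvGroupsB cs S).getD c []) kk
        have hck : c ∈ (pvGroupsB cs S).keys :=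
          (PySem.List.mem_sorted _ _ _ _).mp hc
        have hne := pvGroup_ne cs S c hck
        have hlt := pvGroup_mu_lt cs S c hinv hne
        have hmupos : 1 ≤ pvMu cs S := by omega
        exact ih (pvMu cs S - 1) (by omega) f' g' (pfx ++ [c]) _ kk (by omega)
          (pvGroup_inv cs S c hinv) (by omega) (by omega)

theorem pvFoldl_some {α : Type} (step : Option String × Int → α → Option String × Int)
    (hstep : ∀ a kk c, step (some a, kk) c = (some a, kk)) :
    ∀ (l : List α) (a : String) (kk : Int), l.foldl step (some a, kk) = (some a, kk) := by
  intro l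
  induction l with
  | nil => intro a kk; rfl
  | cons c l ih => intro a kk; rw [List.foldl_cons, hstep a kk c]; exact ih a kk

theorem pvFoldChain (cs : List Char) (F : Nat) (pfx : List Char) (S : List Int) :
    ∀ (gs : List (Char × List Int)) (rest : List (List Char × List Int)) (k0 : Int),
    (∀ g ∈ gs, ∀ kk, pvGoB cs F (pfx ++ [g.1]) ((pvGroupsB cs S).getD g.1 []) kk
        = pvGoB cs (pvMu cs g.2 + 1) (pfx ++ [g.1]) g.2 kk) →
    (match (gs.map Prod.fst).foldl
        (fun st c => match st with
          | (some a, kk) => (some a, kk)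
          | (none, kk) => pvGoB cs F (pfx ++ [c]) ((pvGroupsB cs S).getD c []) kk)
        (none, k0) with
      | (some a, kk) => ((some a : Option String), kk)
      | (none, kk) => pvChain cs rest kk)
    = pvChain cs (gs.map (fun g => (pfx ++ [g.1], g.2)) ++ rest) k0 := by
  intro gs
  induction gs with
  | nil => intro rest k0 _; rfl
  | cons g gs' ih =>
    intro rest k0 hyp
    simp only [List.map_cons, List.foldl_cons, List.cons_append]
    rw [hyp g List.mem_cons_self k0]
    rcases hE : pvGoB cs (pvMu cs g.2 + 1) (pfx ++ [g.1]) g.2 k0 with ⟨o, kk⟩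
    cases o with
    | some a =>
      rw [pvFoldl_some _ (fun a kk c => rfl) (gs'.map Prod.fst) a kk]
      simp only [pvChain, hE]
    | none =>
      have := ih rest kk (fun g hg => hyp g (List.mem_cons_of_mem _ hg))
      simp only [pvChain, hE]
      exact this

theorem pvChildrenB_eq (cs : List Char) (pfx : List Char) (S : List Int) :
    pvChildrenB cs pfx S = ((PySem.List.sorted (pvGroupsB cs S).keys (fun x => x) false).map
      (fun c => (c, (pvGroupsB cs S).getD c []))).map (fun g => (pfx ++ [g.1], g.2)) := by
  simp [pvChildrenB, List.map_map, Function.comp_def]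

theorem pvChainStep (cs : List Char) (pfx : List Char) (S : List Int)
    (rest : List (List Char × List Int)) (k : Int)
    (hinv : pvInv cs S) (hk : ¬ k ≤ (pfx.length : Int)) :
    pvChain cs ((pfx, S) :: rest) k
      = pvChain cs (pvChildrenB cs pfx S ++ rest) (k - pfx.length) := by
  have hgo : pvGoB cs (pvMu cs S + 1) pfx S k
      = (PySem.List.sorted (pvGroupsB cs S).keys (fun x => x) false).foldl
        (fun st c => match st with
          | (some a, kk) => (some a, kk)
          | (none, kk) => pvGoB cs (pvMu cs S) (pfx ++ [c]) ((pvGroupsB cs S).getD c []) kk)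
        (none, k - pfx.length) := by
    simp only [pvGoB]
    rw [if_neg hk]
  set gs := (PySem.List.sorted (pvGroupsB cs S).keys (fun x => x) false).map
      (fun c => (c, (pvGroupsB cs S).getD c [])) with hgsdef
  have hfst : gs.map Prod.fst = PySem.List.sorted (pvGroupsB cs S).keys (fun x => x) false := by
    simp [hgsdef, List.map_map, Function.comp_def]
  have hFC := pvFoldChain cs (pvMu cs S) pfx S gs rest (k - pfx.length) ?_
  · show (match pvGoB cs (pvMu cs S + 1) pfx S k with
      | (some a, kk) => ((some a : Option String), kk)
      | (none, kk) => pvChain cs rest kk) = _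
    rw [hgo, pvChildrenB_eq, ← hgsdef, ← hfst]
    exact hFC
  · intro g hg kk
    rcases List.mem_map.mp hg with ⟨c, hc, rfl⟩
    show pvGoB cs (pvMu cs S) (pfx ++ [c]) ((pvGroupsB cs S).getD c []) kk
        = pvGoB cs (pvMu cs ((pvGroupsB cs S).getD c []) + 1) (pfx ++ [c]) ((pvGroupsB cs S).getD c []) kk
    have hck : c ∈ (pvGroupsB cs S).keys := (PySem.List.mem_sorted _ _ _ _).mp hc
    have hne := pvGroup_ne cs S c hck
    have hlt := pvGroup_mu_lt cs S c hinv hne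
    exact pvGoB_stab cs (pvMu cs ((pvGroupsB cs S).getD c [])) _ _ (pfx ++ [c]) _ kk
      le_rfl (pvGroup_inv cs S c hinv) hlt (by omega)

theorem pvChainCong (cs : List Char) (pfx : List Char) (S : List Int) :
    ∀ (gs : List (Char × List Int)) (rest : List (List Char × List Int)) (k : Int),
    (∀ g ∈ gs, ((pvGroupsB cs S).getD g.1 []).Perm g.2) →
    pvChain cs (gs.map (fun g => (pfx ++ [g.1], (pvGroupsB cs S).getD g.1 [])) ++ rest) k
      = pvChain cs (gs.map (fun g => (pfx ++ [g.1], g.2)) ++ rest) k := by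
  intro gs
  induction gs with
  | nil => intro rest k _; rfl
  | cons g gs' ih =>
    intro rest k hyp
    have hperm := hyp g List.mem_cons_self
    have hmu : pvMu cs ((pvGroupsB cs S).getD g.1 []) = pvMu cs g.2 := pvMu_perm cs hperm
    simp only [List.map_cons, List.cons_append, pvChain]
    rw [hmu, pvGoB_perm cs (pvMu cs g.2 + 1) (pfx ++ [g.1]) hperm k]
    rcases pvGoB cs (pvMu cs g.2 + 1) (pfx ++ [g.1]) g.2 k with ⟨o, kk⟩
    cases o with
    | some a => rfl
    | none => exact ih rest kk (fun g hg => hyp g (List.mem_cons_of_mem _ hg))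

def pvCostA (cs : List Char) (stack : List (List Char × List Int)) : Nat :=
  (stack.map (fun nd => 1 + pvMu cs nd.2)).sum

theorem pvNodesA_eq (cs : List Char) (pfx : List Char) (S : List Int) :
    pvChildrenB cs pfx S = ((pvRuns (pvL cs S)).reverse).map
      (fun g => (pfx ++ [g.1], (pvGroupsB cs S).getD g.1 [])) := by
  rw [pvChildrenB_eq, pvSortedKeys_eq, ← List.map_reverse, List.map_map, List.map_map]
  rfl

theorem pvChainA_eq (cs : List Char) (pfx : List Char) (S : List Int)
    (rest : List (List Char × List Int)) (k : Int) :
    pvChain cs ((((pvRuns (pvL cs S)).map (fun g => (pfx ++ [g.1], g.2))).reverse) ++ rest) k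
      = pvChain cs (pvChildrenB cs pfx S ++ rest) k := by
  rw [← List.map_reverse, pvNodesA_eq]
  exact (pvChainCong cs pfx S ((pvRuns (pvL cs S)).reverse) rest k
    (fun g hg => pvGroup_perm_run cs S g (List.mem_reverse.mp hg))).symm

theorem pvInvA_children (cs : List Char) (pfx : List Char) (S : List Int) (h : pvInv cs S) :
    ∀ nd ∈ ((pvRuns (pvL cs S)).map (fun g => (pfx ++ [g.1], g.2))).reverse, pvInv cs nd.2 := by
  intro nd hnd
  rcases List.mem_map.mp (List.mem_reverse.mp hnd) with ⟨g, hg, rfl⟩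
  exact pvInv_perm cs (pvGroup_perm_run cs S g hg) (pvGroup_inv cs S g.1 h)

theorem pvCostA_children (cs : List Char) (pfx : List Char) (S : List Int) (h : pvInv cs S) :
    pvCostA cs (((pvRuns (pvL cs S)).map (fun g => (pfx ++ [g.1], g.2))).reverse) ≤ pvMu cs S := by
  unfold pvCostA
  rw [← List.map_reverse, List.map_map, List.map_reverse, List.sum_reverse]
  exact pvRuns_cost cs S h

theorem pvMainA (cs : List Char) : ∀ (fuel : Nat) (stack : List (List Char × List Int)) (k : Int),
    (∀ nd ∈ stack, pvInv cs nd.2) → pvCostA cs stack ≤ fuel → 1 ≤ k →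
    pvLoopA cs fuel stack k = (pvChain cs stack k).1 := by
  intro fuel
  induction fuel with
  | zero =>
    intro stack k hinv hcost hk
    cases stack with
    | nil => rfl
    | cons nd rest =>
      exfalso
      simp [pvCostA] at hcost
  | succ f ih =>
    intro stack k hinv hcost hk
    cases stack with
    | nil => rfl
    | cons nd rest =>
      obtain ⟨pfx, S⟩ := nd
      have hinvS : pvInv cs S := hinv (pfx, S) List.mem_cons_self
      by_cases hkp : k ≤ (pfx.length : Int)
      · simp only [pvLoopA, if_pos hkp, pvChain]
        have hgo : pvGoB cs (pvMu cs S + 1) pfx S k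
            = ((PySem.List.pyGet? pfx (k - 1)).map (fun c => String.ofList [c]), k) := by
          simp only [pvGoB]; rw [if_pos hkp]
        rw [hgo]
        have hsome : PySem.List.pyGet? pfx (k - 1) = some (pfx[(k - 1).toNat]) :=
          PySem.List.pyGet?_eq_some_getElem pfx (by omega) (by omega)
        rw [hsome]
        simp
      · simp only [pvLoopA, if_neg hkp]
        rw [show PySem.List.sorted2 (pvPairsA cs S) Prod.fst Prod.snd true = pvL cs S from rfl]
        rw [pvScanPush_eq]
        have hinv' : ∀ nd ∈ (((pvRuns (pvL cs S)).map (fun g => (pfx ++ [g.1], g.2))).reverse ++ rest),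
            pvInv cs nd.2 := by
          intro nd hnd
          rcases List.mem_append.mp hnd with h1 | h2
          · exact pvInvA_children cs pfx S hinvS nd h1
          · exact hinv nd (List.mem_cons_of_mem _ h2)
        have hcost' : pvCostA cs (((pvRuns (pvL cs S)).map (fun g => (pfx ++ [g.1], g.2))).reverse ++ rest) ≤ f := by
          have h1 := pvCostA_children cs pfx S hinvS
          have h2 : pvCostA cs ((pfx, S) :: rest) = 1 + pvMu cs S + pvCostA cs rest := by
            simp [pvCostA]
          have h3 : pvCostA cs (((pvRuns (pvL cs S)).map (fun g => (pfx ++ [g.1], g.2))).reverse ++ rest)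
              = pvCostA cs (((pvRuns (pvL cs S)).map (fun g => (pfx ++ [g.1], g.2))).reverse) + pvCostA cs rest := by
            simp [pvCostA]
          rw [h2] at hcost
          omega
        have hk' : 1 ≤ k - pfx.length := by omega
        rw [ih _ _ hinv' hcost' hk']
        rw [pvChainA_eq]
        rw [← pvChainStep cs pfx S rest k hinvS hkp]

theorem pvRootInv (cs : List Char) : pvInv cs (PySem.List.pyRange 0 cs.length 1) := by
  intro j hj
  rw [PySem.List.mem_pyRange_one] at hj
  omega

theorem pvRootMu (cs : List Char) : pvMu cs (PySem.List.pyRange 0 cs.length 1) ≤ cs.length * cs.length := by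
  unfold pvMu
  have hb : ∀ x ∈ (PySem.List.pyRange 0 (cs.length : Int) 1).map (pvW cs), x ≤ cs.length := by
    intro x hx
    rcases List.mem_map.mp hx with ⟨j, hj, rfl⟩
    rw [PySem.List.mem_pyRange_one] at hj
    unfold pvW
    omega
  have := List.sum_le_card_nsmul _ cs.length hb
  have hlen : ((PySem.List.pyRange 0 (cs.length : Int) 1).map (pvW cs)).length = cs.length := by
    rw [List.length_map, PySem.List.length_pyRange_one]
    omega
  simpa [hlen, Nat.smul_one_eq_cast] using this

-- ====== the trie-emission characterisation shared by both sides ======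

-- `pvOccEnd cs w j`: the substring w of cs occurs ending at (Int) position j
def pvOccEnd (cs : List Char) (w : List Char) (j : Int) : Prop :=
  (w.length : Int) ≤ j ∧ j ≤ (cs.length : Int) ∧
    (cs.drop (j.toNat - w.length)).take w.length = w

-- the node invariant: S is exactly the set of end positions of occurrences of pfx
-- (for the root pfx = [] the position cs.length is, accidentally but harmlessly, absent)
def pvNInv (cs : List Char) (pfx : List Char) (S : List Int) : Prop :=
  ∀ j : Int, j ∈ S ↔ (pvOccEnd cs pfx j ∧ (pfx = [] → j < (cs.length : Int)))

-- the list of substrings the DFS subtree rooted at (pfx, S) emits, in emission order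
def pvEmitF (cs : List Char) : Nat → List Char → List Int → List (List Char)
  | 0, _, _ => []
  | fuel + 1, pfx, S =>
    pfx :: (PySem.List.sorted (PySem.Dict.keys (pvGroupsB cs S)) (fun x => x) false).flatMap
      (fun c => pvEmitF cs fuel (pfx ++ [c]) ((pvGroupsB cs S).getD c []))

def pvEmit (cs : List Char) (pfx : List Char) (S : List Int) : List (List Char) :=
  pvEmitF cs (cs.length - pfx.length + 1) pfx S

theorem pvOccEnd_nonneg {cs w : List Char} {j : Int} (h : pvOccEnd cs w j) : 0 ≤ j := by
  have := h.1; omega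

theorem pvNInv_to_pvInv {cs pfx : List Char} {S : List Int} (h : pvNInv cs pfx S) :
    pvInv cs S := by
  intro j hj
  have := ((h j).mp hj).1
  exact ⟨pvOccEnd_nonneg this, this.2.1⟩

theorem pvOccEnd_infix {cs w : List Char} {j : Int} (h : pvOccEnd cs w j) : w <:+: cs := by
  have hpre := List.take_prefix w.length (cs.drop (j.toNat - w.length))
  rw [h.2.2] at hpre
  exact hpre.isInfix.trans (List.drop_suffix _ _).isInfix

theorem pvInfix_occEnd {cs w : List Char} (h : w <:+: cs) : ∃ j : Int, pvOccEnd cs w j := by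
  obtain ⟨s, t, hst⟩ := h
  refine ⟨((s.length + w.length : Nat) : Int), ?_, ?_, ?_⟩
  · push_cast; omega
  · have : cs.length = s.length + w.length + t.length := by
      rw [← hst]; simp [List.length_append]; omega
    push_cast [this]; omega
  · have h1 : ((s.length + w.length : Nat) : Int).toNat - w.length = s.length := by omega
    rw [h1, ← hst]
    rw [show s ++ w ++ t = s ++ (w ++ t) by simp, List.drop_left]
    exact List.take_left' rfl

theorem pvOccEnd_ext {cs w : List Char} {j : Int} (h : pvOccEnd cs w j)
    (hj : j < (cs.length : Int)) (hn : j.toNat < cs.length) :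
    pvOccEnd cs (w ++ [cs[j.toNat]]) (j + 1) := by
  obtain ⟨h1, h2, h3⟩ := h
  have ha : (j + 1).toNat - (w ++ [cs[j.toNat]]).length = j.toNat - w.length := by
    simp [List.length_append]; omega
  refine ⟨by simp [List.length_append]; omega, by omega, ?_⟩
  rw [ha]
  have hlen : w.length ≤ (cs.drop (j.toNat - w.length)).length := by
    rw [List.length_drop]; omega
  have hidx : (cs.drop (j.toNat - w.length))[w.length]? = some cs[j.toNat] := by
    rw [List.getElem?_drop]
    rw [show j.toNat - w.length + w.length = j.toNat from by omega]
    exact List.getElem?_eq_getElem hn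
  have hlenA : (w ++ [cs[j.toNat]]).length = w.length + 1 := by simp
  rw [hlenA, List.take_add_one, hidx, h3]
  rfl

theorem pvOccEnd_append_right {cs u v : List Char} {j : Int}
    (h : pvOccEnd cs (u ++ v) j) : pvOccEnd cs u (j - v.length) := by
  obtain ⟨h1, h2, h3⟩ := h
  rw [List.length_append] at h1
  push_cast at h1
  have ha : (j - (v.length : Int)).toNat - u.length = j.toNat - (u ++ v).length := by
    simp [List.length_append]; omega
  refine ⟨by omega, by omega, ?_⟩
  rw [ha]
  have : List.take u.length ((cs.drop (j.toNat - (u ++ v).length)).take (u ++ v).length)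
      = List.take u.length (cs.drop (j.toNat - (u ++ v).length)) := by
    rw [List.take_take]
    congr 1
    simp [List.length_append]
  rw [← this, h3, List.take_left]

theorem pvOccEnd_last {cs w : List Char} {c : Char} {j : Int}
    (h : pvOccEnd cs (w ++ [c]) j) :
    (j - 1).toNat < cs.length ∧ cs[(j - 1).toNat]? = some c := by
  obtain ⟨h1, h2, h3⟩ := h
  rw [List.length_append, List.length_singleton] at h1
  push_cast at h1
  have hn1 : (j - 1).toNat < cs.length := by omega
  refine ⟨hn1, ?_⟩
  have ha : j.toNat - (w ++ [c]).length + w.length = (j - 1).toNat := by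
    simp [List.length_append]; omega
  have := congrArg (fun l => l[w.length]?) h3
  simp only at this
  rw [List.getElem?_take, if_pos (by simp [List.length_append])] at this
  rw [List.getElem?_drop, ha] at this
  rw [this, List.getElem?_concat_length]

-- membership of the group of next-char c: exactly the occurrence ends of pfx ++ [c]
theorem pvGroup_mem_iff {cs pfx : List Char} {S : List Int} (h : pvNInv cs pfx S)
    (c : Char) (j' : Int) :
    j' ∈ (pvGroupsB cs S).getD c [] ↔ pvOccEnd cs (pfx ++ [c]) j' := by
  rw [pvGroupsB_getD]
  constructor
  · intro hj'
    rcases List.mem_map.mp hj' with ⟨p, hp, rfl⟩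
    have hpc : p.1 = c := by simpa using List.of_mem_filter hp
    rcases List.mem_filterMap.mp (List.mem_of_mem_filter hp) with ⟨j, hjS, hf⟩
    by_cases hlt : j < (cs.length : Int)
    · rw [if_pos hlt] at hf
      have hocc := ((h j).mp hjS).1
      have h0 : 0 ≤ j := pvOccEnd_nonneg hocc
      have hjn : j.toNat < cs.length := by omega
      have hget : PySem.List.pyGet? cs j = some cs[j.toNat] :=
        PySem.List.pyGet?_eq_some_getElem cs h0 (by omega)
      rw [hget] at hf
      simp only [Option.map_some] at hf
      have hpeq : p = (cs[j.toNat], j + 1) := by injection hf with hh; exact hh.symm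
      have hcc : cs[j.toNat] = c := by rw [hpeq] at hpc; simpa using hpc
      rw [hpeq]
      show pvOccEnd cs (pfx ++ [c]) (j + 1)
      rw [← hcc]
      exact pvOccEnd_ext hocc hlt hjn
    · rw [if_neg hlt] at hf; cases hf
  · intro hocc
    have hlast := pvOccEnd_last hocc
    have hsh := pvOccEnd_append_right hocc
    simp only [List.length_singleton] at hsh
    have hj1 : pvOccEnd cs pfx (j' - 1) := hsh
    have hjlt : j' - 1 < (cs.length : Int) := by
      have := hocc.2.1
      have := hocc.1
      simp [List.length_append] at this
      omega
    have hjS : (j' - 1) ∈ S := (h (j' - 1)).mpr ⟨hj1, fun _ => hjlt⟩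
    have h0 : 0 ≤ j' - 1 := pvOccEnd_nonneg hj1
    have hget : PySem.List.pyGet? cs (j' - 1) = some cs[(j' - 1).toNat] :=
      PySem.List.pyGet?_eq_some_getElem cs h0 hjlt
    have hcv : cs[(j' - 1).toNat] = c := by
      have := hlast.2
      rw [List.getElem?_eq_getElem hlast.1] at this
      injection this
    apply List.mem_map.mpr
    refine ⟨(c, j'), ?_, rfl⟩
    apply List.mem_filter.mpr
    refine ⟨?_, by simp⟩
    apply List.mem_filterMap.mpr
    refine ⟨j' - 1, hjS, ?_⟩
    rw [if_pos hjlt, hget, hcv]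
    simp

theorem pvKeys_iff (cs : List Char) (S : List Int) (c : Char) :
    c ∈ (pvGroupsB cs S).keys ↔ (pvGroupsB cs S).getD c [] ≠ [] := by
  constructor
  · exact pvGroup_ne cs S c
  · intro hne
    rw [pvGroupsB_getD] at hne
    rcases List.exists_mem_of_ne_nil _ hne with ⟨j', hj'⟩
    rcases List.mem_map.mp hj' with ⟨p, hp, rfl⟩
    have hpc : p.1 = c := by simpa using List.of_mem_filter hp
    rw [pvGroupsB_keys, PySem.Set.mem_ofList]
    exact hpc ▸ List.mem_map_of_mem (List.mem_of_mem_filter hp)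

theorem pvChildFacts {cs pfx : List Char} {S : List Int} (h : pvNInv cs pfx S) {c : Char}
    (hc : c ∈ PySem.List.sorted (pvGroupsB cs S).keys (fun x => x) false) :
    pvNInv cs (pfx ++ [c]) ((pvGroupsB cs S).getD c [])
      ∧ pfx.length < cs.length ∧ (pvGroupsB cs S).getD c [] ≠ [] := by
  have hck : c ∈ (pvGroupsB cs S).keys := (PySem.List.mem_sorted _ _ _ _).mp hc
  have hne := pvGroup_ne cs S c hck
  rcases List.exists_mem_of_ne_nil _ hne with ⟨j', hj'⟩
  have hocc := (pvGroup_mem_iff h c j').mp hj'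
  have hlen : pfx.length < cs.length := by
    have h1 := hocc.1
    have h2 := hocc.2.1
    simp only [List.length_append, List.length_singleton] at h1
    push_cast at h1
    omega
  refine ⟨?_, hlen, hne⟩
  intro j
  rw [pvGroup_mem_iff h c j]
  simp

theorem pvKeys_deep (cs : List Char) {pfx : List Char} {S : List Int} (h : pvNInv cs pfx S)
    (hd : cs.length ≤ pfx.length) :
    PySem.List.sorted (pvGroupsB cs S).keys (fun x => x) false = [] := by
  by_contra hne
  rcases List.exists_mem_of_ne_nil _ hne with ⟨c, hc⟩
  exact absurd (pvChildFacts h hc).2.1 (by omega)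

theorem pvEmit_unfold {cs pfx : List Char} {S : List Int} (h : pvNInv cs pfx S) :
    pvEmit cs pfx S
      = pfx :: (PySem.List.sorted (pvGroupsB cs S).keys (fun x => x) false).flatMap
          (fun c => pvEmit cs (pfx ++ [c]) ((pvGroupsB cs S).getD c [])) := by
  by_cases hlt : pfx.length < cs.length
  · show pvEmitF cs (cs.length - pfx.length + 1) pfx S = _
    simp only [pvEmitF]
    congr 1
    have hfe : (fun c => pvEmitF cs (cs.length - pfx.length) (pfx ++ [c]) ((pvGroupsB cs S).getD c []))
        = (fun c => pvEmit cs (pfx ++ [c]) ((pvGroupsB cs S).getD c [])) := by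
      funext c
      unfold pvEmit
      congr 1
      simp only [List.length_append, List.length_singleton]
      omega
    rw [hfe]
  · rw [pvKeys_deep cs h (by omega)]
    show pvEmitF cs (cs.length - pfx.length + 1) pfx S = pfx :: List.flatMap _ []
    rw [show cs.length - pfx.length + 1 = 1 from by omega]
    simp only [pvEmitF]
    rw [pvKeys_deep cs h (by omega)]
    simp

theorem pvEmit_prefix {cs : List Char} : ∀ (d : Nat) {pfx : List Char} {S : List Int},
    pvNInv cs pfx S → cs.length - pfx.length ≤ d →
    ∀ w ∈ pvEmit cs pfx S, pfx <+: w := by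
  intro d
  induction d using Nat.strong_induction_on with
  | _ d ih =>
    intro pfx S h hd w hw
    rw [pvEmit_unfold h] at hw
    rcases List.mem_cons.mp hw with rfl | hw'
    · exact List.prefix_refl _
    · rcases List.mem_flatMap.mp hw' with ⟨c, hc, hwc⟩
      obtain ⟨hchild, hlen, _⟩ := pvChildFacts h hc
      have hrec : (pfx ++ [c]) <+: w := by
        apply ih (cs.length - (pfx.length + 1)) (by omega) hchild
          (by simp [List.length_append]) w hwc
      exact (List.prefix_append pfx [c]).trans hrec

theorem pvEmit_mem {cs : List Char} : ∀ (d : Nat) {pfx : List Char} {S : List Int},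
    pvNInv cs pfx S → cs.length - pfx.length ≤ d →
    ∀ w, w ∈ pvEmit cs pfx S ↔ (w = pfx ∨ (pfx <+: w ∧ w ≠ pfx ∧ w <:+: cs)) := by
  intro d
  induction d using Nat.strong_induction_on with
  | _ d ih =>
    intro pfx S h hd w
    rw [pvEmit_unfold h]
    constructor
    · intro hw
      rcases List.mem_cons.mp hw with rfl | hw'
      · exact Or.inl rfl
      · rcases List.mem_flatMap.mp hw' with ⟨c, hc, hwc⟩
        obtain ⟨hchild, hlen, hne⟩ := pvChildFacts h hc
        rcases List.exists_mem_of_ne_nil _ hne with ⟨j', hj'⟩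
        have hoccc := (pvGroup_mem_iff h c j').mp hj'
        have hrec := (ih (cs.length - (pfx.length + 1)) (by omega) hchild
          (by simp [List.length_append]) w).mp hwc
        right
        rcases hrec with rfl | ⟨hp, _, hinf⟩
        · exact ⟨List.prefix_append pfx [c], by simp, pvOccEnd_infix hoccc⟩
        · refine ⟨(List.prefix_append pfx [c]).trans hp, ?_, hinf⟩
          intro hcon
          have := hp.length_le
          simp [hcon, List.length_append] at this
    · intro hw
      rcases hw with rfl | ⟨hp, hne, hinf⟩
      · exact List.mem_cons_self
      · obtain ⟨t, ht⟩ := hp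
        cases t with
        | nil => exact absurd (by simpa using ht.symm) hne
        | cons c rest =>
          have hw' : w = (pfx ++ [c]) ++ rest := by rw [← ht]; simp
          obtain ⟨e, he⟩ := pvInfix_occEnd hinf
          have heo : pvOccEnd cs ((pfx ++ [c]) ++ rest) e := hw' ▸ he
          have hshr : pvOccEnd cs (pfx ++ [c]) (e - rest.length) :=
            pvOccEnd_append_right heo
          have hmemg : (e - (rest.length : Int)) ∈ (pvGroupsB cs S).getD c [] :=
            (pvGroup_mem_iff h c _).mpr hshr
          have hnec : (pvGroupsB cs S).getD c [] ≠ [] := by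
            intro hcon; rw [hcon] at hmemg; cases hmemg
          have hck : c ∈ (pvGroupsB cs S).keys := (pvKeys_iff cs S c).mpr hnec
          have hcs : c ∈ PySem.List.sorted (pvGroupsB cs S).keys (fun x => x) false :=
            (PySem.List.mem_sorted _ _ _ _).mpr hck
          obtain ⟨hchild, hlen, _⟩ := pvChildFacts h hcs
          apply List.mem_cons_of_mem
          apply List.mem_flatMap.mpr
          refine ⟨c, hcs, ?_⟩
          apply (ih (cs.length - (pfx.length + 1)) (by omega) hchild
            (by simp [List.length_append]) w).mpr
          cases rest with
          | nil => exact Or.inl (by simpa using hw')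
          | cons c2 r2 =>
            right
            refine ⟨⟨c2 :: r2, hw'.symm⟩, ?_, hinf⟩
            intro hcon
            have : w.length = (pfx ++ [c]).length + (c2 :: r2).length := by
              rw [hw', List.length_append]
            simp [hcon, List.length_append] at this

-- a strict prefix is lexicographically smaller
theorem pvLtAppend (p : List Char) (c : Char) (t : List Char) : p < p ++ c :: t := by
  induction p with
  | nil => exact (List.lt_iff_lex_lt _ _).mpr List.Lex.nil
  | cons x p ih => exact (List.lt_iff_lex_lt _ _).mpr (List.Lex.cons ((List.lt_iff_lex_lt _ _).mp ih))

theorem pvLtCross (p : List Char) (c1 c2 : Char) (r1 r2 : List Char) (h : c1 < c2) :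
    p ++ c1 :: r1 < p ++ c2 :: r2 :=
  List.append_left_lt ((List.lt_iff_lex_lt _ _).mpr (List.Lex.rel h))

theorem pvSortedKeys_lt (cs : List Char) (S : List Int) :
    (PySem.List.sorted (pvGroupsB cs S).keys (fun x => x) false).Pairwise (· < ·) := by
  have hle := PySem.List.sorted_pairwise (pvGroupsB cs S).keys (fun x => x)
  have hnd : (PySem.List.sorted (pvGroupsB cs S).keys (fun x => x) false).Nodup :=
    ((PySem.List.sorted_perm _ _ _).nodup_iff).mpr (pvGroupsB_keys_nodup cs S)
  exact (hle.and hnd).imp (fun hab => lt_of_le_of_ne hab.1 hab.2)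

theorem pvEmit_pairwise {cs : List Char} : ∀ (d : Nat) {pfx : List Char} {S : List Int},
    pvNInv cs pfx S → cs.length - pfx.length ≤ d →
    (pvEmit cs pfx S).Pairwise (· < ·) := by
  intro d
  induction d using Nat.strong_induction_on with
  | _ d ih =>
    intro pfx S h hd
    rw [pvEmit_unfold h]
    rw [List.pairwise_cons]
    constructor
    · intro w hw
      rcases List.mem_flatMap.mp hw with ⟨c, hc, hwc⟩
      obtain ⟨hchild, hlen, _⟩ := pvChildFacts h hc
      have hp : (pfx ++ [c]) <+: w :=
        pvEmit_prefix (cs.length - (pfx.length + 1)) hchild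
          (by simp [List.length_append]) w hwc
      obtain ⟨t, ht⟩ := hp
      have : w = pfx ++ (c :: t) := by rw [← ht]; simp
      exact this ▸ pvLtAppend pfx c t
    · rw [List.flatMap_def]
      apply List.pairwise_flatten.mpr
      constructor
      · intro l' hl'
        rcases List.mem_map.mp hl' with ⟨c, hc, rfl⟩
        obtain ⟨hchild, hlen, _⟩ := pvChildFacts h hc
        exact ih (cs.length - (pfx.length + 1)) (by omega) hchild
          (by simp [List.length_append])
      · apply List.pairwise_map.mpr
        have hkeys := pvSortedKeys_lt cs S
        apply List.Pairwise.imp_of_mem ?_ hkeys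
        intro c1 c2 hc1 hc2 hlt w1 hw1 w2 hw2
        obtain ⟨hchild1, hlen1, _⟩ := pvChildFacts h hc1
        obtain ⟨hchild2, hlen2, _⟩ := pvChildFacts h hc2
        have hp1 : (pfx ++ [c1]) <+: w1 :=
          pvEmit_prefix (cs.length - (pfx.length + 1)) hchild1
            (by simp [List.length_append]) w1 hw1
        have hp2 : (pfx ++ [c2]) <+: w2 :=
          pvEmit_prefix (cs.length - (pfx.length + 1)) hchild2
            (by simp [List.length_append]) w2 hw2
        obtain ⟨t1, ht1⟩ := hp1
        obtain ⟨t2, ht2⟩ := hp2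
        have hw1' : w1 = pfx ++ (c1 :: t1) := by rw [← ht1]; simp
        have hw2' : w2 = pfx ++ (c2 :: t2) := by rw [← ht2]; simp
        rw [hw1', hw2']
        exact pvLtCross pfx c1 c2 t1 t2 hlt

-- pyGet? through an append
theorem pvGet_append_left {a b : List Char} {i : Int} (h0 : 0 ≤ i) (h1 : i.toNat < a.length) :
    PySem.List.pyGet? (a ++ b) i = PySem.List.pyGet? a i := by
  rw [PySem.List.pyGet?_of_nonneg _ h0, PySem.List.pyGet?_of_nonneg _ h0]
  exact List.getElem?_append_left h1

theorem pvGet_append_right {a b : List Char} {i : Int} (h0 : 0 ≤ i) (h1 : a.length ≤ i.toNat) :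
    PySem.List.pyGet? (a ++ b) i = PySem.List.pyGet? b (i - a.length) := by
  rw [PySem.List.pyGet?_of_nonneg _ h0,
    PySem.List.pyGet?_of_nonneg _ (by omega : (0 : Int) ≤ i - a.length)]
  rw [show (i - (a.length : Int)).toNat = i.toNat - a.length from by omega]
  exact List.getElem?_append_right h1

theorem pvFlattenFlatMap {α β : Type} (L : List α) (g : α → List (List β)) :
    (L.flatMap g).flatten = L.flatMap (fun c => (g c).flatten) := by
  induction L with
  | nil => simp
  | cons x L ih => simp [List.flatMap_cons, List.flatten_append, ih]

-- the central lemma: pvGoB (A's per-node recursion) indexes into the node's emission string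
theorem pvGoB_emit (cs : List Char) : ∀ (d : Nat) (pfx : List Char) (S : List Int) (k : Int)
    (f : Nat), pvNInv cs pfx S → pvMu cs S < f → 1 ≤ k → cs.length - pfx.length ≤ d →
    ((k ≤ (((pvEmit cs pfx S).flatten.length : Nat) : Int) →
      (pvGoB cs f pfx S k).1
        = (PySem.List.pyGet? (pvEmit cs pfx S).flatten (k - 1)).map (fun c => String.ofList [c]))
    ∧ ((((pvEmit cs pfx S).flatten.length : Nat) : Int) < k →
      pvGoB cs f pfx S k = (none, k - (pvEmit cs pfx S).flatten.length))) := by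
  intro d
  induction d using Nat.strong_induction_on with
  | _ d ih =>
    intro pfx S k f h hmu hk hd
    obtain ⟨f', rfl⟩ := Nat.exists_eq_succ_of_ne_zero (by omega : f ≠ 0)
    have hE : (pvEmit cs pfx S).flatten
        = pfx ++ (PySem.List.sorted (pvGroupsB cs S).keys (fun x => x) false).flatMap
            (fun c => (pvEmit cs (pfx ++ [c]) ((pvGroupsB cs S).getD c [])).flatten) := by
      rw [pvEmit_unfold h, List.flatten_cons, pvFlattenFlatMap]
    by_cases hkp : k ≤ (pfx.length : Int)
    · have hgo : pvGoB cs (f' + 1) pfx S k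
          = ((PySem.List.pyGet? pfx (k - 1)).map (fun c => String.ofList [c]), k) := by
        simp only [pvGoB]; rw [if_pos hkp]
      constructor
      · intro _
        rw [hgo, hE, pvGet_append_left (by omega) (by omega)]
      · intro hlt
        exfalso
        rw [hE, List.length_append] at hlt
        push_cast at hlt
        omega
    · -- recursive case: fold over the sorted next characters
      have hgo : pvGoB cs (f' + 1) pfx S k
          = (PySem.List.sorted (pvGroupsB cs S).keys (fun x => x) false).foldl
              (fun st c => match st with
                | (some a, kk) => (some a, kk)
                | (none, kk) => pvGoB cs f' (pfx ++ [c]) ((pvGroupsB cs S).getD c []) kk)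
              (none, k - pfx.length) := by
        simp only [pvGoB]; rw [if_neg hkp]
      have hsub : ∀ (L : List Char),
          (∀ c ∈ L, c ∈ PySem.List.sorted (pvGroupsB cs S).keys (fun x => x) false) →
          ∀ k0 : Int, 1 ≤ k0 →
          ((k0 ≤ (((L.flatMap (fun c => (pvEmit cs (pfx ++ [c]) ((pvGroupsB cs S).getD c [])).flatten)).length : Nat) : Int) →
            (L.foldl
              (fun st c => match st with
                | (some a, kk) => (some a, kk)
                | (none, kk) => pvGoB cs f' (pfx ++ [c]) ((pvGroupsB cs S).getD c []) kk)
              (none, k0)).1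
              = (PySem.List.pyGet?
                  (L.flatMap (fun c => (pvEmit cs (pfx ++ [c]) ((pvGroupsB cs S).getD c [])).flatten))
                  (k0 - 1)).map (fun c => String.ofList [c]))
          ∧ ((((L.flatMap (fun c => (pvEmit cs (pfx ++ [c]) ((pvGroupsB cs S).getD c [])).flatten)).length : Nat) : Int) < k0 →
            L.foldl
              (fun st c => match st with
                | (some a, kk) => (some a, kk)
                | (none, kk) => pvGoB cs f' (pfx ++ [c]) ((pvGroupsB cs S).getD c []) kk)
              (none, k0) = (none, k0 - (L.flatMap (fun c => (pvEmit cs (pfx ++ [c]) ((pvGroupsB cs S).getD c [])).flatten)).length))) := by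
        intro L
        induction L with
        | nil =>
          intro _ k0 hk0
          refine ⟨fun hle => ?_, fun _ => by simp⟩
          exfalso; simp at hle; omega
        | cons c L' ihL =>
          intro hLmem k0 hk0
          have hc := hLmem c List.mem_cons_self
          obtain ⟨hchild, hlen, hne⟩ := pvChildFacts h hc
          have hmuc : pvMu cs ((pvGroupsB cs S).getD c []) < f' := by
            have := pvGroup_mu_lt cs S c (pvNInv_to_pvInv h) hne
            omega
          have hrec := ih (cs.length - (pfx.length + 1)) (by omega) (pfx ++ [c])
            ((pvGroupsB cs S).getD c []) k0 f' hchild hmuc hk0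
            (by simp [List.length_append])
          set Ec := (pvEmit cs (pfx ++ [c]) ((pvGroupsB cs S).getD c [])).flatten with hEc
          set FL' := L'.flatMap (fun c => (pvEmit cs (pfx ++ [c]) ((pvGroupsB cs S).getD c [])).flatten) with hFL'
          have hflat : (c :: L').flatMap (fun c => (pvEmit cs (pfx ++ [c]) ((pvGroupsB cs S).getD c [])).flatten)
              = Ec ++ FL' := by rw [List.flatMap_cons]
          rw [hflat]
          have hfold : List.foldl
              (fun st c => match st with
                | (some a, kk) => (some a, kk)
                | (none, kk) => pvGoB cs f' (pfx ++ [c]) ((pvGroupsB cs S).getD c []) kk)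
              ((none : Option String), k0) (c :: L')
              = List.foldl
              (fun st c => match st with
                | (some a, kk) => (some a, kk)
                | (none, kk) => pvGoB cs f' (pfx ++ [c]) ((pvGroupsB cs S).getD c []) kk)
              (pvGoB cs f' (pfx ++ [c]) ((pvGroupsB cs S).getD c []) k0) L' := rfl
          rcases hEq : pvGoB cs f' (pfx ++ [c]) ((pvGroupsB cs S).getD c []) k0 with ⟨o, k'⟩
          rw [hEq] at hfold
          by_cases hcase : k0 ≤ ((Ec.length : Nat) : Int)
          · have h1 := hrec.1 hcase
            rw [hEq] at h1
            have hgets : PySem.List.pyGet? Ec (k0 - 1) = some Ec[(k0 - 1).toNat] :=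
              PySem.List.pyGet?_eq_some_getElem Ec (by omega) (by omega)
            rw [hgets] at h1
            simp only [Option.map_some] at h1
            subst h1
            have hfoldsome := pvFoldl_some
              (fun st c => match st with
                | (some a, kk) => ((some a : Option String), kk)
                | (none, kk) => pvGoB cs f' (pfx ++ [c]) ((pvGroupsB cs S).getD c []) kk)
              (fun a kk c => rfl) L'
            constructor
            · intro _
              rw [hfold, hfoldsome]
              rw [pvGet_append_left (by omega) (by omega), hgets]
              rfl
            · intro hlt
              exfalso
              rw [List.length_append] at hlt
              push_cast at hlt
              omega
          · have h2 := hrec.2 (by omega)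
            rw [hEq] at h2
            obtain ⟨rfl, rfl⟩ : o = none ∧ k' = k0 - Ec.length := Prod.mk.inj h2
            have hk0' : 1 ≤ k0 - (Ec.length : Int) := by omega
            have hrest := ihL (fun c hc => hLmem c (List.mem_cons_of_mem _ hc))
              (k0 - Ec.length) hk0'
            constructor
            · intro hle
              rw [hfold]
              have := hrest.1 (by rw [List.length_append] at hle; push_cast at hle; omega)
              rw [this]
              rw [pvGet_append_right (by omega) (by omega)]
              congr 2
              omega
            · intro hlt
              rw [hfold]
              have := hrest.2 (by rw [List.length_append] at hlt; push_cast at hlt; omega)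
              rw [this]
              rw [List.length_append]
              congr 1
              omega
      have hmain := hsub (PySem.List.sorted (pvGroupsB cs S).keys (fun x => x) false)
        (fun c hc => hc) (k - pfx.length) (by omega)
      constructor
      · intro hle
        rw [hgo]
        rw [hE] at hle
        rw [List.length_append] at hle
        push_cast at hle
        rw [hmain.1 (by omega)]
        rw [hE, pvGet_append_right (by omega) (by omega)]
        congr 2
        omega
      · intro hlt
        rw [hgo]
        rw [hE, List.length_append] at hlt
        push_cast at hlt
        rw [hmain.2 (by omega)]
        rw [hE, List.length_append]
        congr 1
        omega

-- the root node satisfies the invariant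
theorem pvRootNInv (cs : List Char) : pvNInv cs [] (PySem.List.pyRange 0 cs.length 1) := by
  intro j
  rw [PySem.List.mem_pyRange_one]
  unfold pvOccEnd
  constructor
  · intro hj
    refine ⟨⟨?_, ?_, ?_⟩, fun _ => hj.2⟩
    · simpa using hj.1
    · omega
    · simp
  · rintro ⟨⟨h1, h2, _⟩, h3⟩
    exact ⟨by simpa using h1, h3 rfl⟩

-- B's generated slices are exactly the nonempty substrings
theorem pvGen_mem (cs : List Char) (w : List Char) :
    w ∈ pvGen cs ↔ (w ≠ [] ∧ w <:+: cs) := by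
  unfold pvGen
  rw [List.mem_flatMap]
  constructor
  · rintro ⟨i, hi, hw⟩
    rw [PySem.List.mem_pyRange_one] at hi
    rcases List.mem_map.mp hw with ⟨j, hj, rfl⟩
    rw [PySem.List.mem_pyRange_one] at hj
    have hs : PySem.List.slice cs (some i) (some j)
        = (cs.drop i.toNat).take (j.toNat - i.toNat) := by
      rw [PySem.List.slice_toNat cs (by omega) (by omega)]
    rw [hs]
    constructor
    · intro hcon
      have := congrArg List.length hcon
      rw [List.length_take, List.length_drop] at this
      simp at this
      omega
    · exact ((List.take_prefix _ _).isInfix).trans ((List.drop_suffix _ _).isInfix)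
  · rintro ⟨hne, hinf⟩
    obtain ⟨e, he⟩ := pvInfix_occEnd hinf
    obtain ⟨h1, h2, h3⟩ := he
    have hwpos : 1 ≤ w.length := by
      cases w with
      | nil => exact absurd rfl hne
      | cons _ _ => simp
    refine ⟨((e.toNat - w.length : Nat) : Int), ?_, ?_⟩
    · rw [PySem.List.mem_pyRange_one]
      constructor
      · omega
      · omega
    · apply List.mem_map.mpr
      refine ⟨((e.toNat : Nat) : Int), ?_, ?_⟩
      · rw [PySem.List.mem_pyRange_one]
        omega
      · rw [PySem.List.slice_natCast]
        rw [show e.toNat - (e.toNat - w.length) = w.length from by omega]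
        exact h3

-- `sorted_eq_of_perm_of_pairwise_lt` restated for the `<` List Char carries by default
-- (propositionally the same order as the LinearOrder instance the library lemma names)
theorem pvSortedIdEq (xs ys : List (List Char)) (hp : ys.Perm xs)
    (hs : ys.Pairwise (fun a b => a < b)) :
    PySem.List.sorted xs (fun x => x) false = ys := by
  have h := PySem.List.sorted_eq_of_perm_of_pairwise_lt xs ys (fun x => x) hp
    (hs.imp (fun hab => by exact (List.lt_iff_lex_lt _ _).mp hab))
  refine Eq.trans ?_ h
  show List.foldl _ [] xs = List.foldl _ [] xs
  congr 1
  funext acc x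
  congr 1
  funext a b
  exact decide_eq_decide.mpr (List.lt_iff_lex_lt a b)

-- sorted(set of all substrings) is exactly the tail of the root emission list
theorem pvSortedGen_eq (cs : List Char) :
    [] :: PySem.List.sorted (PySem.Set.ofList (pvGen cs)) (fun x => x) false
      = pvEmit cs [] (PySem.List.pyRange 0 cs.length 1) := by
  have hroot := pvRootNInv cs
  have hunf := pvEmit_unfold hroot
  set T := (PySem.List.sorted (pvGroupsB cs (PySem.List.pyRange 0 cs.length 1)).keys (fun x => x) false).flatMap
      (fun c => pvEmit cs ([] ++ [c]) ((pvGroupsB cs (PySem.List.pyRange 0 cs.length 1)).getD c [])) with hT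
  have hpw : (pvEmit cs [] (PySem.List.pyRange 0 cs.length 1)).Pairwise (· < ·) :=
    pvEmit_pairwise cs.length hroot (by simp)
  rw [hunf] at hpw ⊢
  congr 1
  apply pvSortedIdEq
  · have hndT : T.Nodup := by
      have := (List.pairwise_cons.mp hpw).2
      exact this.imp (fun hab => ne_of_lt hab)
    apply (List.perm_ext_iff_of_nodup hndT (PySem.Set.nodup_ofList _)).mpr
    intro w
    rw [PySem.Set.mem_ofList, pvGen_mem]
    have hmem := pvEmit_mem cs.length hroot (by simp) w
    rw [hunf] at hmem
    have hwne : w ∈ T → w ≠ [] := by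
      intro hwT hcon
      have hlt := (List.pairwise_cons.mp hpw).1 w hwT
      rw [hcon] at hlt
      exact absurd hlt (lt_irrefl _)
    constructor
    · intro hwT
      have := hmem.mp (List.mem_cons_of_mem _ hwT)
      rcases this with rfl | ⟨_, hne, hinf⟩
      · exact absurd rfl (hwne hwT)
      · exact ⟨hne, hinf⟩
    · rintro ⟨hne, hinf⟩
      have := hmem.mpr (Or.inr ⟨List.nil_prefix, hne, hinf⟩)
      rcases List.mem_cons.mp this with rfl | hwT
      · exact absurd rfl hne
      · exact hwT
  · exact (List.pairwise_cons.mp hpw).2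

-- ===== VERDICT (by name: the statement is the Claim_ definition above) =====
theorem ashtonString_spec : Claim_equal_ashtonString := by
  intro text k _ hpre
  unfold Spec_ashtonString
  have hk : (1 : Int) ≤ k := hpre
  show pvLoopA text.toList _ _ k = _
  set cs := text.toList with hcs
  have hinvroot := pvRootInv cs
  have hmuroot := pvRootMu cs
  have hA : pvLoopA cs (cs.length * cs.length + cs.length + 2)
      [([], PySem.List.pyRange 0 cs.length 1)] k
      = (pvChain cs [([], PySem.List.pyRange 0 cs.length 1)] k).1 := by
    apply pvMainA
    · intro nd hnd
      rcases List.mem_singleton.mp hnd with rfl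
      exact hinvroot
    · simp only [pvCostA, List.map_cons, List.map_nil, List.sum_cons, List.sum_nil]
      omega
    · exact hk
  rw [hA]
  set S0 := PySem.List.pyRange 0 (cs.length : Int) 1 with hS0
  have hG := pvGoB_emit cs cs.length [] S0 k (pvMu cs S0 + 1) (pvRootNInv cs)
    (by omega) hk (by simp)
  set W := (pvEmit cs [] S0).flatten with hW
  have hWrw : W = ((PySem.List.sorted (PySem.Set.ofList (pvGen cs)) (fun x => x) false).flatten) := by
    rw [hW, ← pvSortedGen_eq cs, List.flatten_cons, List.nil_append]
  have halt : ashtonString_alt text k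
      = if k ≤ (((PySem.List.sorted (PySem.Set.ofList (pvGen cs)) (fun x => x) false).flatten.length : Nat) : Int) then
          (PySem.List.pyGet? ((PySem.List.sorted (PySem.Set.ofList (pvGen cs)) (fun x => x) false).flatten) (k - 1)).map
            (fun c => String.ofList [c])
        else none := rfl
  rw [halt, ← hWrw]
  by_cases hkW : k ≤ ((W.length : Nat) : Int)
  · rw [if_pos hkW]
    have h1 := hG.1 hkW
    rcases hEq : pvGoB cs (pvMu cs S0 + 1) [] S0 k with ⟨o, k'⟩
    rw [hEq] at h1
    simp only [pvChain, hEq]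
    have hgets : PySem.List.pyGet? W (k - 1) = some W[(k - 1).toNat] :=
      PySem.List.pyGet?_eq_some_getElem W (by omega) (by omega)
    rw [hgets] at h1 ⊢
    simp only at h1
    subst h1
    rfl
  · rw [if_neg hkW]
    have h2 := hG.2 (by omega)
    simp only [pvChain, h2]
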